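-- pv_equiv track=rewrite | github.com/burning-calamity/extirpation | src/extirpation/bundled_online/fibonacci_shift.py | fibonacci_shift_encrypt
-- ===== SOURCE A (Python) =====
-- def _shift_char(ch: str, shift: int) -> str:
--     if "A" <= ch <= "Z":
--         return chr((ord(ch) - ord("A") + shift) % 26 + ord("A"))
--     if "a" <= ch <= "z":
--         return chr((ord(ch) - ord("a") + shift) % 26 + ord("a"))
--     return ch
--
-- def _fib_sequence(n: int) -> list[int]:
--     if n <= 0:
--         return []
--     if n == 1:
--         return [1]
--     seq = [1, 1]
--     while len(seq) < n:
--         seq.append(seq[-1] + seq[-2])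
--     return seq
--
-- def fibonacci_shift_encrypt(plaintext: str, seed_shift: int = 0) -> str:
--     letters = [ch for ch in plaintext if ch.isalpha()]
--     fib = _fib_sequence(len(letters))
--     out: list[str] = []
--     idx = 0
--     for ch in plaintext:
--         if ch.isalpha():
--             out.append(_shift_char(ch, seed_shift + fib[idx]))
--             idx += 1
--         else:
--             out.append(ch)
--     return "".join(out)
-- ===== SOURCE B (Python) =====
-- def fibonacci_shift_encrypt(plaintext: str, seed_shift: int = 0) -> str:
--     # Single pass; Fibonacci kept modulo 26 so no big integers are ever built.
--     out = []
--     a, b = 1, 1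
--     s = seed_shift % 26
--     for ch in plaintext:
--         o = ord(ch)
--         if 65 <= o <= 90:
--             out.append(chr((o - 65 + s + a) % 26 + 65))
--             a, b = b, (a + b) % 26
--         elif 97 <= o <= 122:
--             out.append(chr((o - 97 + s + a) % 26 + 97))
--             a, b = b, (a + b) % 26
--         else:
--             out.append(ch)
--     return "".join(out)
-- ===== Notes on version B (the rewrite author's own statement) =====
-- stated objective: faster
-- what changed: Replaces the precomputed big-integer Fibonacci list (built in a separate pass over the filtered letters) with a single pass that carries the Fibonacci pair reduced modulo 26, so no list of ever-growing integers is built.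
import Mathlib
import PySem

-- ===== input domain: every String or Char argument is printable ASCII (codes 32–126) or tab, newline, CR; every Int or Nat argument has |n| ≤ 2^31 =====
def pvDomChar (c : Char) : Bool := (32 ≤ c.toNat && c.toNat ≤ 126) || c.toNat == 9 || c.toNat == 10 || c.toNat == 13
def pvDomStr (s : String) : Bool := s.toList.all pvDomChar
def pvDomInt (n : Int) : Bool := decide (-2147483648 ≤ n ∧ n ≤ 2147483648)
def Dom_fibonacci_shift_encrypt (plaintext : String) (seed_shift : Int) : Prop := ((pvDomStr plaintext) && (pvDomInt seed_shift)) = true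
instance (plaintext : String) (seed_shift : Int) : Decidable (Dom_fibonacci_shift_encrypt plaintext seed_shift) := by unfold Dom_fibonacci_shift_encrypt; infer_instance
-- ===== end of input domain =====

-- B replaces A's separately built big-integer Fibonacci list by a single pass carrying
-- the Fibonacci pair reduced modulo 26 (objective: faster; only the value mod 26 matters).

-- ===== PORT A =====
-- _shift_char; "A" <= ch <= "Z" is Char order, ord("A")/ord("a") written as 65/97
def pvShiftChar (ch : Char) (shift : Int) : Char :=
  if 'A' ≤ ch ∧ ch ≤ 'Z' then
    Char.ofNat ((PySem.Int.mod ((ch.toNat : Int) - 65 + shift) 26 + 65).toNat)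
  else if 'a' ≤ ch ∧ ch ≤ 'z' then
    Char.ofNat ((PySem.Int.mod ((ch.toNat : Int) - 97 + shift) 26 + 97).toNat)
  else ch

-- the 'while len(seq) < n: seq.append(seq[-1] + seq[-2])' loop of _fib_sequence;
-- seq always has ≥ 2 elements here, so seq[-1]/seq[-2] never raise and pyGetD _ _ 0 is exact
def pvFibWhile (n : Int) (seq : List Int) : List Int :=
  if (seq.length : Int) < n then
    pvFibWhile n (seq ++ [PySem.List.pyGetD seq (-1) 0 + PySem.List.pyGetD seq (-2) 0])
  else seq
termination_by (n - seq.length).toNat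
decreasing_by simp; omega

def pvFibSequence (n : Int) : List Int :=
  if n ≤ 0 then [] else if n = 1 then [1] else pvFibWhile n [1, 1]

-- loop body of fibonacci_shift_encrypt over state (out, idx);
-- ch.isalpha() → PySem.Chars.isalpha (exact on the ASCII domain);
-- idx is always < len(fib), so fib[idx] never raises and pyGetD fib idx 0 is exact
def pvStepA (seed_shift : Int) (fib : List Int) (st : List Char × Int) (ch : Char) : List Char × Int :=
  if PySem.Chars.isalpha ch then
    (st.1 ++ [pvShiftChar ch (seed_shift + PySem.List.pyGetD fib st.2 0)], st.2 + 1)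
  else (st.1 ++ [ch], st.2)

def fibonacci_shift_encrypt (plaintext : String) (seed_shift : Int) : String :=
  let letters := plaintext.toList.filter (fun ch => PySem.Chars.isalpha ch)
  let fib := pvFibSequence (letters.length : Int)
  let r := plaintext.toList.foldl (pvStepA seed_shift fib) ([], 0)
  String.ofList r.1

-- ===== PORT B =====
-- loop body of Source B over state (out, a, b): Fibonacci pair kept mod 26
def pvStepB (s : Int) (st : List Char × Int × Int) (ch : Char) : List Char × Int × Int :=
  let o : Int := ch.toNat
  if 65 ≤ o ∧ o ≤ 90 then
    (st.1 ++ [Char.ofNat (PySem.Int.mod (o - 65 + s + st.2.1) 26 + 65).toNat],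
      st.2.2, PySem.Int.mod (st.2.1 + st.2.2) 26)
  else if 97 ≤ o ∧ o ≤ 122 then
    (st.1 ++ [Char.ofNat (PySem.Int.mod (o - 97 + s + st.2.1) 26 + 97).toNat],
      st.2.2, PySem.Int.mod (st.2.1 + st.2.2) 26)
  else (st.1 ++ [ch], st.2)

def fibonacci_shift_encrypt_alt (plaintext : String) (seed_shift : Int) : String :=
  let s := PySem.Int.mod seed_shift 26
  let r := plaintext.toList.foldl (pvStepB s) ([], 1, 1)
  String.ofList r.1

-- ===== PRECONDITION & SPEC =====
def Spec_fibonacci_shift_encrypt (plaintext : String) (seed_shift : Int) (out : String) : Prop := out = fibonacci_shift_encrypt_alt plaintext seed_shift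
instance (plaintext : String) (seed_shift : Int) (out : String) : Decidable (Spec_fibonacci_shift_encrypt plaintext seed_shift out) := by unfold Spec_fibonacci_shift_encrypt; infer_instance

-- ===== CLAIM (what is proved, stated in full; the proofs are below) =====
def Claim_equal_fibonacci_shift_encrypt : Prop := ∀ (plaintext : String) (seed_shift : Int), Dom_fibonacci_shift_encrypt plaintext seed_shift → Spec_fibonacci_shift_encrypt plaintext seed_shift (fibonacci_shift_encrypt plaintext seed_shift)

-- ===== LEMMAS AND PROOFS =====

-- the mathematical Fibonacci sequence A's list holds: fibI i = _fib_sequence(n)[i]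
def fibI : Nat → Int
  | 0 => 1
  | 1 => 1
  | (n + 2) => fibI n + fibI (n + 1)

-- A's seq[-1] / seq[-2] on the partially built list
theorem pv_getD_neg (m : Nat) (i : Nat) (hi : i < m + 2) :
    PySem.List.pyGetD ((List.range (m+2)).map fibI) (-(i:Int) - 1) 0 = fibI (m + 1 - i) := by
  simp only [PySem.List.pyGetD, PySem.List.pyGet?, PySem.List.pyIdx?, List.length_map,
    List.length_range]
  rw [if_neg (by omega), if_pos (by push_cast; omega)]
  have h1 : (-(-(i:Int) - 1)).toNat = i + 1 := by omega
  rw [h1]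
  rw [Option.bind_some, List.getElem?_eq_getElem (by simp; omega)]
  simp only [Option.getD_some, List.getElem_map, List.getElem_range]
  congr 1
  omega

theorem pv_fibWhile_eq (n m : Nat) :
    pvFibWhile (n : Int) ((List.range (m+2)).map fibI) = (List.range (max (m+2) n)).map fibI := by
  rw [pvFibWhile]
  simp only [List.length_map, List.length_range]
  by_cases h : m + 2 < n
  · rw [if_pos (by exact_mod_cast h)]
    have g1 := pv_getD_neg m 0 (by omega)
    have g2 := pv_getD_neg m 1 (by omega)
    norm_num at g1 g2
    rw [g1, g2]
    have heq : (List.range (m+2)).map fibI ++ [fibI (m+1) + fibI m] = (List.range ((m+1)+2)).map fibI := by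
      conv_rhs => rw [show (m+1)+2 = (m+2)+1 from rfl, List.range_succ, List.map_append,
        List.map_singleton, show fibI (m+2) = fibI m + fibI (m+1) from rfl, Int.add_comm (fibI m)]
    rw [heq, pv_fibWhile_eq n (m+1), show max (m+1+2) n = max (m+2) n by omega]
  · rw [if_neg (by exact_mod_cast h), show max (m+2) n = m+2 by omega]
termination_by n - m

theorem pv_fibSequence_eq (n : Nat) : pvFibSequence (n : Int) = (List.range n).map fibI := by
  match n with
  | 0 => rfl
  | 1 => rfl
  | (m + 2) =>
    rw [pvFibSequence, if_neg (by omega), if_neg (by omega)]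
    have h0 : [(1 : Int), 1] = (List.range (0+2)).map fibI := rfl
    rw [h0, pv_fibWhile_eq (m+2) 0, show max (0+2) (m+2) = m+2 by omega]

-- the common per-character specification: letter number k is shifted by seed + fibI k
def pvGo (seed : Int) : List Char → Nat → List Char
  | [], _ => []
  | c :: cs, k =>
    if 65 ≤ (c.toNat : Int) ∧ (c.toNat : Int) ≤ 90 then
      Char.ofNat ((PySem.Int.mod ((c.toNat : Int) - 65 + (seed + fibI k)) 26 + 65).toNat) :: pvGo seed cs (k+1)
    else if 97 ≤ (c.toNat : Int) ∧ (c.toNat : Int) ≤ 122 then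
      Char.ofNat ((PySem.Int.mod ((c.toNat : Int) - 97 + (seed + fibI k)) 26 + 97).toNat) :: pvGo seed cs (k+1)
    else c :: pvGo seed cs k

def pvCnt (cs : List Char) : Nat := (cs.filter (fun ch => PySem.Chars.isalpha ch)).length

theorem pv_upper_iff (c : Char) : ('A' ≤ c ∧ c ≤ 'Z') ↔ (65 ≤ (c.toNat : Int) ∧ (c.toNat : Int) ≤ 90) := by
  simp only [Char.le_def, UInt32.le_iff_toNat_le]
  constructor
  · intro h; exact ⟨by exact_mod_cast h.1, by exact_mod_cast h.2⟩
  · intro h; exact ⟨by exact_mod_cast h.1, by exact_mod_cast h.2⟩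

theorem pv_lower_iff (c : Char) : ('a' ≤ c ∧ c ≤ 'z') ↔ (97 ≤ (c.toNat : Int) ∧ (c.toNat : Int) ≤ 122) := by
  simp only [Char.le_def, UInt32.le_iff_toNat_le]
  constructor
  · intro h; exact ⟨by exact_mod_cast h.1, by exact_mod_cast h.2⟩
  · intro h; exact ⟨by exact_mod_cast h.1, by exact_mod_cast h.2⟩

theorem pv_isalpha_iff (c : Char) : PySem.Chars.isalpha c = true ↔
    ((65 ≤ (c.toNat : Int) ∧ (c.toNat : Int) ≤ 90) ∨ (97 ≤ (c.toNat : Int) ∧ (c.toNat : Int) ≤ 122)) := by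
  rw [← pv_upper_iff, ← pv_lower_iff]
  simp [PySem.Chars.isalpha, PySem.Chars.isupper, PySem.Chars.islower]

theorem pv_cnt_cons (c : Char) (cs : List Char) :
    pvCnt (c :: cs) = (if PySem.Chars.isalpha c then 1 else 0) + pvCnt cs := by
  simp [pvCnt, List.filter_cons]
  split
  · simp; omega
  · simp

-- A's loop: with fib the full Fibonacci list, letter number k gets shift seed + fibI k
theorem pv_loopA (seed : Int) (N : Nat) :
    ∀ (cs : List Char) (out : List Char) (k : Nat), k + pvCnt cs ≤ N →
    cs.foldl (pvStepA seed ((List.range N).map fibI)) (out, (k : Int)) =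
      (out ++ pvGo seed cs k, ((k + pvCnt cs : Nat) : Int)) := by
  intro cs
  induction cs with
  | nil => intro out k _; simp [pvGo, pvCnt]
  | cons c cs ih =>
    intro out k hk
    rw [pv_cnt_cons] at hk ⊢
    by_cases ha : PySem.Chars.isalpha c
    · have hkN : k < N := by rw [if_pos ha] at hk; omega
      have hfib : PySem.List.pyGetD ((List.range N).map fibI) ((k : Nat) : Int) 0 = fibI k := by
        rw [PySem.List.pyGetD_natCast, PySem.List.getD_map_range _ _ _ _ hkN]
      simp only [List.foldl_cons, pvStepA, if_pos ha, hfib]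
      have hc : ((k : Int) + 1) = ((k + 1 : Nat) : Int) := by push_cast; ring
      rw [hc, ih (out ++ [pvShiftChar c (seed + fibI k)]) (k+1) (by rw [if_pos ha] at hk; omega)]
      rcases (pv_isalpha_iff c).mp ha with hu | hl
      · rw [pvGo, if_pos hu]
        simp only [pvShiftChar, if_pos ((pv_upper_iff c).mpr hu), Prod.mk.injEq]
        refine ⟨by simp, by push_cast; ring⟩
      · have hnu : ¬ (65 ≤ (c.toNat : Int) ∧ (c.toNat : Int) ≤ 90) := by omega
        rw [pvGo, if_neg hnu, if_pos hl]
        simp only [pvShiftChar, if_neg (fun h => hnu ((pv_upper_iff c).mp h)),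
          if_pos ((pv_lower_iff c).mpr hl), Prod.mk.injEq]
        refine ⟨by simp, by push_cast; ring⟩
    · have hno := (fun h => ha ((pv_isalpha_iff c).mpr h))
      simp only [List.foldl_cons, pvStepA, if_neg ha]
      rw [ih (out ++ [c]) k (by rw [if_neg ha] at hk; omega)]
      rw [pvGo, if_neg (fun h => hno (Or.inl h)), if_neg (fun h => hno (Or.inr h))]
      simp only [Prod.mk.injEq]
      refine ⟨by simp, by push_cast; ring⟩

theorem pv_mod26_add (x y : Int) :
    PySem.Int.mod (PySem.Int.mod x 26 + PySem.Int.mod y 26) 26 = PySem.Int.mod (x + y) 26 := by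
  rw [PySem.Int.mod_eq_emod_of_pos (by norm_num), PySem.Int.mod_eq_emod_of_pos (by norm_num),
    PySem.Int.mod_eq_emod_of_pos (by norm_num), PySem.Int.mod_eq_emod_of_pos (by norm_num)]
  omega

theorem pv_mod26_shift (o seed f base : Int) :
    PySem.Int.mod (o - base + PySem.Int.mod seed 26 + PySem.Int.mod f 26) 26 =
      PySem.Int.mod (o - base + (seed + f)) 26 := by
  rw [PySem.Int.mod_eq_emod_of_pos (by norm_num), PySem.Int.mod_eq_emod_of_pos (by norm_num),
    PySem.Int.mod_eq_emod_of_pos (by norm_num), PySem.Int.mod_eq_emod_of_pos (by norm_num)]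
  omega

-- B's loop: state (a, b) is the Fibonacci pair (fibI k, fibI (k+1)) reduced mod 26
theorem pv_loopB (seed : Int) :
    ∀ (cs : List Char) (out : List Char) (k : Nat) (a b : Int),
    a = PySem.Int.mod (fibI k) 26 → b = PySem.Int.mod (fibI (k+1)) 26 →
    (cs.foldl (pvStepB (PySem.Int.mod seed 26)) (out, a, b)).1 = out ++ pvGo seed cs k := by
  intro cs
  induction cs with
  | nil => intro out k a b _ _; simp [pvGo]
  | cons c cs ih =>
    intro out k a b hA hB
    have hnext : PySem.Int.mod (a + b) 26 = PySem.Int.mod (fibI (k+2)) 26 := by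
      rw [hA, hB, pv_mod26_add, show fibI (k+2) = fibI k + fibI (k+1) from rfl]
    by_cases hu : 65 ≤ ((c.toNat : Int)) ∧ ((c.toNat : Int)) ≤ 90
    · simp only [List.foldl_cons, pvStepB, if_pos hu]
      rw [ih _ (k+1) b (PySem.Int.mod (a + b) 26) hB hnext]
      rw [pvGo, if_pos hu, hA, pv_mod26_shift]
      simp
    · by_cases hl : 97 ≤ ((c.toNat : Int)) ∧ ((c.toNat : Int)) ≤ 122
      · simp only [List.foldl_cons, pvStepB, if_neg hu, if_pos hl]
        rw [ih _ (k+1) b (PySem.Int.mod (a + b) 26) hB hnext]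
        rw [pvGo, if_neg hu, if_pos hl, hA, pv_mod26_shift]
        simp
      · simp only [List.foldl_cons, pvStepB, if_neg hu, if_neg hl]
        rw [ih _ k a b hA hB, pvGo, if_neg hu, if_neg hl]
        simp

-- ===== VERDICT (by name: the statement is the Claim_ definition above) =====
theorem fibonacci_shift_encrypt_spec : Claim_equal_fibonacci_shift_encrypt := by
  intro plaintext seed_shift _
  unfold Spec_fibonacci_shift_encrypt
  show String.ofList (plaintext.toList.foldl (pvStepA seed_shift
      (pvFibSequence ((plaintext.toList.filter (fun ch => PySem.Chars.isalpha ch)).length : Int))) ([], 0)).1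
    = String.ofList (plaintext.toList.foldl (pvStepB (PySem.Int.mod seed_shift 26)) ([], 1, 1)).1
  have hA := pv_loopA seed_shift (pvCnt plaintext.toList) plaintext.toList [] 0 (by omega)
  have hB := pv_loopB seed_shift plaintext.toList [] 0 1 1 (by decide) (by decide)
  simp only [Nat.cast_zero] at hA
  rw [show ((plaintext.toList.filter (fun ch => PySem.Chars.isalpha ch)).length : Int)
      = ((pvCnt plaintext.toList : Nat) : Int) from rfl,
    pv_fibSequence_eq, hA, hB]
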